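-- pv_equiv track=rewrite | github.com/sharky564/SDD-Major-Work-OCR | Loading_Data.py | formatted
-- ===== SOURCE A (Python) =====
-- def formatted(text, text_len):
--     '''The Connectionist Temporal Classification requires the words to be modified when being scored because of letter repeats'''
--     cost = 0
--     for i in range(len(text)):
--         if i != 0 and text[i] == text[i - 1]:
--             cost += 2
--         else:
--             cost += 1
--         if cost > text_len:
--             return text[:i]
--     return text
-- ===== SOURCE B (Python) =====
-- from itertools import groupby
--
-- def formatted(text, text_len):
--     # Run-length encode the text; a run of L equal chars costs 2*L - 1
--     # (1 for its first char, 2 for each repeat). Spend the budget run by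
--     # run; inside the run that overflows, the number of affordable chars
--     # has the closed form (budget + 1) // 2.
--     budget = text_len
--     taken = 0
--     for _, grp in groupby(text):
--         run_len = len(list(grp))
--         run_cost = 2 * run_len - 1
--         if run_cost <= budget:
--             budget -= run_cost
--             taken += run_len
--         else:
--             return text[:taken + max(0, (budget + 1) // 2)]
--     return text
-- ===== Notes on version B (the rewrite author's own statement) =====
-- stated objective: alternative
-- what changed: Replaces the per-character cost accumulator with run-length encoding: each maximal run of L equal characters costs 2*L-1, the budget is spent run by run, and inside the overflowing run the number of affordable characters is the closed form (budget+1)//2.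
import Mathlib
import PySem

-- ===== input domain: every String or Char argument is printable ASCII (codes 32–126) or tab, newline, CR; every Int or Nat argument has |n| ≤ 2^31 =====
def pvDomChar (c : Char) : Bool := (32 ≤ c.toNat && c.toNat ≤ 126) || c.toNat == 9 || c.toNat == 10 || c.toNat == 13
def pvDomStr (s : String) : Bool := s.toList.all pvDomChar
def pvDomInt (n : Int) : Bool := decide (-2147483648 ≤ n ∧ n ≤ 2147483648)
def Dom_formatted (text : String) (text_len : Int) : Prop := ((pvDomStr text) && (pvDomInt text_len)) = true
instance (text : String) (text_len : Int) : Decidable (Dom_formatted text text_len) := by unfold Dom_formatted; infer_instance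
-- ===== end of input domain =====

-- B replaces A's per-character cost accumulator by run-length encoding with closed-form per-run arithmetic; alternative decomposition, same cost.


-- ===== PORT A =====
-- A's loop 'for i in range(len(text))' with accumulator cost and early return;
-- indices are always in range, so getD is exact for text[i] / text[i-1].
def formattedGoA (cs : List Char) (tl : Int) : List Nat → Int → String
  | [], _ => String.ofList cs
  | i :: rest, cost =>
    let cost' : Int := if i ≠ 0 ∧ cs.getD i ' ' = cs.getD (i - 1) ' ' then cost + 2 else cost + 1
    if cost' > tl then String.ofList (cs.take i) else formattedGoA cs tl rest cost'

def formatted (text : String) (text_len : Int) : String :=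
  formattedGoA text.toList text_len (List.range text.toList.length) 0

-- ===== PORT B =====
-- itertools.groupby ported as a run-length encoder: pushRun prepends one char
-- to an encoding, runsB folds it over the string.
def pushRun (c : Char) : List (Char × Nat) → List (Char × Nat)
  | [] => [(c, 1)]
  | (c', n) :: t => if c = c' then (c, n + 1) :: t else (c, 1) :: (c', n) :: t

def runsB : List Char → List (Char × Nat)
  | [] => []
  | c :: rest => pushRun c (runsB rest)

-- Source B's loop over the runs: spend the budget run by run (a run of L equal
-- chars costs 2*L-1); in the overflowing run, (budget+1)//2 chars fit.
def goB (cs : List Char) : List (Char × Nat) → Int → Nat → String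
  | [], _, _ => String.ofList cs
  | (_, runLen) :: rest, budget, taken =>
    let runCost : Int := 2 * (runLen : Int) - 1
    if runCost ≤ budget then goB cs rest (budget - runCost) (taken + runLen)
    else String.ofList (PySem.List.slice cs none
      (some ((taken : Int) + max 0 (PySem.Int.floordiv (budget + 1) 2))))

def formatted_alt (text : String) (text_len : Int) : String :=
  goB text.toList (runsB text.toList) text_len 0

-- ===== PRECONDITION & SPEC =====
def Spec_formatted (text : String) (text_len : Int) (out : String) : Prop := out = formatted_alt text text_len
instance (text : String) (text_len : Int) (out : String) : Decidable (Spec_formatted text text_len out) := by unfold Spec_formatted; infer_instance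

-- ===== CLAIM (what is proved, stated in full; the proofs are below) =====
def Claim_equal_formatted : Prop := ∀ (text : String) (text_len : Int), Dom_formatted text text_len → Spec_formatted text text_len (formatted text text_len)

-- ===== LEMMAS AND PROOFS =====

-- Reference function both ports are reduced to: how many leading chars of l
-- are kept with budget b, the previous char being prev (a kept char costs 2
-- if it equals the previous char, else 1).
def keepN : Option Char → Int → List Char → Nat
  | _, _, [] => 0
  | prev, b, c :: rest =>
    let step : Int := if some c = prev then 2 else 1
    if b < step then 0 else 1 + keepN (some c) (b - step) rest

theorem keepN_of_lt_one (prev : Option Char) (b : Int) (l : List Char) (hb : b < 1) :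
    keepN prev b l = 0 := by
  cases l with
  | nil => rfl
  | cons c rest =>
    simp only [keepN]
    rcases eq_or_ne (some c) prev with h | h
    · rw [if_pos h, if_pos (by omega : b < (2 : Int))]
    · rw [if_neg h, if_pos hb]

-- keepN on a run of the SAME char as prev: each char costs 2.
theorem keepN_inside (c : Char) (b : Int) (L : Nat) (rest : List Char) :
    keepN (some c) b (List.replicate L c ++ rest)
      = if (2 * (L : Int)) ≤ b then L + keepN (some c) (b - 2 * L) rest
        else ((PySem.Int.floordiv b 2).toNat) := by
  induction L generalizing b with
  | zero =>
    simp only [List.replicate, List.nil_append, Nat.cast_zero, mul_zero]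
    by_cases hb : (0 : Int) ≤ b
    · rw [if_pos hb]; norm_num
    · rw [if_neg hb, keepN_of_lt_one _ _ _ (by omega)]
      have : PySem.Int.floordiv b 2 < 0 := by
        rw [PySem.Int.floordiv_eq_ediv_of_pos (by omega)]; omega
      omega
  | succ L ih =>
    rw [List.replicate_succ, List.cons_append]
    simp only [keepN]
    rw [if_pos trivial]
    by_cases h2 : b < 2
    · rw [if_pos h2, if_neg (by push_cast; omega)]
      have : PySem.Int.floordiv b 2 ≤ 0 := by
        rw [PySem.Int.floordiv_eq_ediv_of_pos (by omega)]; omega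
      omega
    · rw [if_neg h2, ih]
      have hdiv : PySem.Int.floordiv (b - 2) 2 = PySem.Int.floordiv b 2 - 1 := by
        rw [PySem.Int.floordiv_eq_ediv_of_pos (by omega),
            PySem.Int.floordiv_eq_ediv_of_pos (by omega)]; omega
      by_cases hL : (2 * (L : Int)) ≤ b - 2
      · rw [if_pos hL, if_pos (by push_cast; omega)]
        have he : b - 2 - 2 * (L : Int) = b - 2 * ((L : Nat) + 1 : Nat) := by push_cast; ring
        rw [he]; omega
      · rw [if_neg hL, if_neg (by push_cast; omega), hdiv]
        have : 1 ≤ PySem.Int.floordiv b 2 := by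
          rw [PySem.Int.floordiv_eq_ediv_of_pos (by omega)]; omega
        omega

-- keepN on a FRESH run (first char differs from prev): costs 1, 2, 2, …;
-- the whole run of length L+1 costs 2*(L+1)-1, a partial take affords (b+1)//2.
theorem keepN_run (c : Char) (prev : Option Char) (hne : some c ≠ prev)
    (b : Int) (L : Nat) (rest : List Char) :
    keepN prev b (c :: (List.replicate L c ++ rest))
      = if (2 * (((L : Nat) + 1 : Nat) : Int) - 1) ≤ b then
          (L + 1) + keepN (some c) (b - (2 * (((L : Nat) + 1 : Nat) : Int) - 1)) rest
        else ((PySem.Int.floordiv (b + 1) 2).toNat) := by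
  simp only [keepN]
  rw [if_neg hne]
  by_cases h1 : b < 1
  · rw [if_pos h1, if_neg (by push_cast; omega)]
    have : PySem.Int.floordiv (b + 1) 2 ≤ 0 := by
      rw [PySem.Int.floordiv_eq_ediv_of_pos (by omega)]; omega
    omega
  · rw [if_neg h1, keepN_inside]
    have hdiv : PySem.Int.floordiv (b + 1) 2 = PySem.Int.floordiv (b - 1) 2 + 1 := by
      rw [PySem.Int.floordiv_eq_ediv_of_pos (by omega),
          PySem.Int.floordiv_eq_ediv_of_pos (by omega)]; omega
    by_cases hL : (2 * (L : Int)) ≤ b - 1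
    · rw [if_pos hL, if_pos (by push_cast; omega)]
      have he : b - 1 - 2 * (L : Int) = b - (2 * (((L : Nat) + 1 : Nat) : Int) - 1) := by
        push_cast; ring
      rw [he]; omega
    · rw [if_neg hL, if_neg (by push_cast; omega), hdiv]
      have : 0 ≤ PySem.Int.floordiv (b - 1) 2 := by
        rw [PySem.Int.floordiv_eq_ediv_of_pos (by omega)]; omega
      omega

-- ---- A's side: the index loop computes cs.take (keepN none tl cs) ----

def prevOf (cs : List Char) (s : Nat) : Option Char :=
  if s = 0 then none else some (cs.getD (s - 1) ' ')

theorem lemA (cs : List Char) (tl : Int) :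
    ∀ (m s : Nat) (acc : Int), s + m = cs.length →
      formattedGoA cs tl (List.range' s m) acc
        = String.ofList (cs.take (s + keepN (prevOf cs s) (tl - acc) (cs.drop s))) := by
  intro m
  induction m with
  | zero =>
    intro s acc h
    have hs : s = cs.length := by omega
    subst hs
    simp [formattedGoA, keepN, List.drop_length]
  | succ m ih =>
    intro s acc h
    have hlt : s < cs.length := by omega
    rw [List.range'_succ]
    simp only [formattedGoA]
    have hdrop : cs.drop s = cs[s] :: cs.drop (s + 1) := List.drop_eq_getElem_cons hlt
    have hgetD : cs.getD s ' ' = cs[s] := by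
      simp only [List.getD]
      rw [List.getElem?_eq_getElem hlt]
      rfl
    have hcond : (s ≠ 0 ∧ cs.getD s ' ' = cs.getD (s - 1) ' ')
        ↔ (some cs[s] = prevOf cs s) := by
      unfold prevOf
      constructor
      · rintro ⟨h0, he⟩; rw [if_neg h0, ← hgetD, he]
      · intro he
        by_cases h0 : s = 0
        · rw [if_pos h0] at he; exact absurd he (by simp)
        · rw [if_neg h0] at he; exact ⟨h0, by rw [hgetD]; exact Option.some.inj he⟩
    have hprev : prevOf cs (s + 1) = some cs[s] := by
      unfold prevOf
      rw [if_neg (by omega)]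
      simp only [Nat.add_sub_cancel]
      rw [hgetD]
    rw [hdrop]
    simp only [keepN]
    by_cases hc : some cs[s] = prevOf cs s
    · rw [if_pos hc]
      simp only [if_pos (hcond.mpr hc)]
      by_cases hover : acc + 2 > tl
      · rw [if_pos hover, if_pos (by omega : tl - acc < (2 : Int))]
        simp
      · rw [if_neg hover, if_neg (by omega : ¬ tl - acc < (2 : Int)),
            ih (s + 1) (acc + 2) (by omega), hprev]
        have he : tl - (acc + 2) = tl - acc - 2 := by ring
        rw [he, Nat.add_assoc]
    · rw [if_neg hc]
      simp only [if_neg (fun h => hc (hcond.mp h))]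
      by_cases hover : acc + 1 > tl
      · rw [if_pos hover, if_pos (by omega : tl - acc < (1 : Int))]
        simp
      · rw [if_neg hover, if_neg (by omega : ¬ tl - acc < (1 : Int)),
            ih (s + 1) (acc + 1) (by omega), hprev]
        have he : tl - (acc + 1) = tl - acc - 1 := by ring
        rw [he, Nat.add_assoc]

-- ---- B's side: runsB is a correct run-length encoding ----

def decodeRuns : List (Char × Nat) → List Char
  | [] => []
  | (c, n) :: t => List.replicate n c ++ decodeRuns t

def runsOk : Option Char → List (Char × Nat) → Prop
  | _, [] => True
  | prev, (c, n) :: t => some c ≠ prev ∧ 1 ≤ n ∧ runsOk (some c) t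

theorem runsB_decode (l : List Char) : decodeRuns (runsB l) = l := by
  induction l with
  | nil => rfl
  | cons c rest ih =>
    simp only [runsB]
    cases hr : runsB rest with
    | nil =>
      rw [hr] at ih
      simp only [decodeRuns] at ih
      simp [pushRun, decodeRuns, ← ih]
    | cons p t =>
      obtain ⟨c', n⟩ := p
      rw [hr] at ih
      by_cases hcc : c = c'
      · subst hcc
        simp only [pushRun] at *
        rw [if_pos trivial]
        simp only [decodeRuns] at ih
        simp only [decodeRuns, List.replicate_succ, List.cons_append]
        rw [ih]
      · simp only [pushRun] at *
        rw [if_neg hcc]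
        simp only [decodeRuns] at ih
        simp only [decodeRuns, List.replicate_succ, List.replicate_zero,
          List.cons_append, List.nil_append]
        rw [ih]

theorem runsB_ok (l : List Char) : runsOk none (runsB l) := by
  induction l with
  | nil => trivial
  | cons c rest ih =>
    simp only [runsB]
    cases hr : runsB rest with
    | nil => exact ⟨by simp, le_refl 1, trivial⟩
    | cons p t =>
      obtain ⟨c', n⟩ := p
      rw [hr] at ih
      obtain ⟨_, hn, ht⟩ := ih
      by_cases hcc : c = c'
      · subst hcc
        simp only [pushRun]
        rw [if_pos trivial]
        exact ⟨by simp, by omega, ht⟩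
      · simp only [pushRun]
        rw [if_neg hcc]
        exact ⟨by simp, le_refl 1, ⟨by simpa using Ne.symm hcc, hn, ht⟩⟩

theorem lemB (cs : List Char) :
    ∀ (rs : List (Char × Nat)) (prev : Option Char) (b : Int) (tn : Nat),
      runsOk prev rs → tn + (decodeRuns rs).length = cs.length →
      goB cs rs b tn = String.ofList (cs.take (tn + keepN prev b (decodeRuns rs))) := by
  intro rs
  induction rs with
  | nil =>
    intro prev b tn _ hlen
    simp only [decodeRuns, List.length_nil, Nat.add_zero] at hlen ⊢
    simp [goB, keepN, hlen]
  | cons p t ih =>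
    obtain ⟨c, n⟩ := p
    intro prev b tn hok hlen
    obtain ⟨hne, hn, ht⟩ := hok
    obtain ⟨L, rfl⟩ : ∃ L, n = L + 1 := ⟨n - 1, by omega⟩
    simp only [goB, decodeRuns]
    rw [List.replicate_succ, List.cons_append,
      keepN_run c prev hne b L (decodeRuns t)]
    by_cases hcost : (2 * (((L : Nat) + 1 : Nat) : Int) - 1) ≤ b
    · rw [if_pos hcost, if_pos hcost]
      rw [ih (some c) (b - (2 * (((L : Nat) + 1 : Nat) : Int) - 1)) (tn + (L + 1)) ht
        (by simp only [decodeRuns, List.length_append, List.length_replicate] at hlen ⊢; omega)]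
      have he : ∀ k : Nat, tn + (L + 1) + k = tn + (L + 1 + k) := by omega
      rw [he]
    · rw [if_neg hcost, if_neg hcost]
      congr 1
      have hmax : max 0 (PySem.Int.floordiv (b + 1) 2)
          = ((PySem.Int.floordiv (b + 1) 2).toNat : Int) := by
        by_cases h : 0 ≤ PySem.Int.floordiv (b + 1) 2
        · rw [max_eq_right h, Int.toNat_of_nonneg h]
        · rw [max_eq_left (by omega)]; omega
      rw [hmax]
      have he : ((tn : Int) + ((PySem.Int.floordiv (b + 1) 2).toNat : Int))
          = ((tn + (PySem.Int.floordiv (b + 1) 2).toNat : Nat) : Int) := by push_cast; ring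
      rw [he, PySem.List.slice_to_natCast]

-- ===== VERDICT (by name: the statement is the Claim_ definition above) =====
theorem formatted_spec : Claim_equal_formatted := by
  intro text text_len _
  show formatted text text_len = formatted_alt text text_len
  unfold formatted formatted_alt
  rw [List.range_eq_range']
  rw [lemA text.toList text_len text.toList.length 0 0 (by omega)]
  rw [lemB text.toList (runsB text.toList) none text_len 0 (runsB_ok _)
    (by rw [runsB_decode]; omega)]
  rw [runsB_decode]
  simp [prevOf]
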